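-- pv_equiv track=rewrite | github.com/qlurkin/PI2CChampionshipRunner | bitonicSort.py | greatestPowerOfTwoLessThan
-- ===== SOURCE A (Python) =====
-- def greatestPowerOfTwoLessThan(n):
--     assert n > 1
--     res = 0
--     next = 1
--     while next < n:
--         res = next
--         next = next*2
--     return res
-- ===== SOURCE B (Python) =====
-- def greatestPowerOfTwoLessThan(n):
--     assert n > 1
--     return 1 << ((n - 1).bit_length() - 1)
-- ===== Notes on version B (the rewrite author's own statement) =====
-- stated objective: idiomatic
-- what changed: Replaces the doubling loop with the closed form 1 << ((n-1).bit_length() - 1): the highest set bit of n-1 is the largest power of two strictly below n.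
import Mathlib
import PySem

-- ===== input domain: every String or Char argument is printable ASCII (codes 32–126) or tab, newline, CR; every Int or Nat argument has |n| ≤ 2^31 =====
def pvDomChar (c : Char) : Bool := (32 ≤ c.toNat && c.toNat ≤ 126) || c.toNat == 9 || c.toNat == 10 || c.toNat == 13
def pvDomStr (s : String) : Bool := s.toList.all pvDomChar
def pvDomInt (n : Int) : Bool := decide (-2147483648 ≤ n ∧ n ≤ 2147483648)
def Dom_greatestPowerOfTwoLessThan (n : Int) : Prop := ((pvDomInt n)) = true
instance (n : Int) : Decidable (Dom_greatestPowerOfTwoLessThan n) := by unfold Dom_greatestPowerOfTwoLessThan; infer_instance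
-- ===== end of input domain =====

-- B replaces A's doubling loop by the closed form 1 << ((n-1).bit_length() - 1) (more idiomatic, same values).


-- ===== PORT A =====
-- A's while loop; `0 < next` is a totality guard only (always true on the entry call's reachable states, where next starts at 1 and doubles).
def greatestPowerOfTwoLessThanLoop (res next n : Int) : Int :=
  if _h : 0 < next ∧ next < n then greatestPowerOfTwoLessThanLoop next (next * 2) n else res
termination_by (n - next).toNat
decreasing_by omega

def greatestPowerOfTwoLessThan (n : Int) : Int :=
  -- assert n > 1 (raises for n ≤ 1: excluded by Pre_)
  greatestPowerOfTwoLessThanLoop 0 1 n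

-- ===== PORT B =====
-- 1 << ((n - 1).bit_length() - 1); bit_length of a nonnegative int is Nat.size.
def greatestPowerOfTwoLessThan_alt (n : Int) : Int :=
  (1 : Int) * 2 ^ (Nat.size (n - 1).toNat - 1)

-- ===== PRECONDITION & SPEC =====
-- A's assert: for n ≤ 1 the Python raises AssertionError.
def Pre_greatestPowerOfTwoLessThan (n : Int) : Prop := 1 < n
instance (n : Int) : Decidable (Pre_greatestPowerOfTwoLessThan n) := by unfold Pre_greatestPowerOfTwoLessThan; infer_instance
def pvWitness_greatestPowerOfTwoLessThan : Int := 5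

def Spec_greatestPowerOfTwoLessThan (n : Int) (out : Int) : Prop := out = greatestPowerOfTwoLessThan_alt n
instance (n : Int) (out : Int) : Decidable (Spec_greatestPowerOfTwoLessThan n out) := by unfold Spec_greatestPowerOfTwoLessThan; infer_instance

-- ===== CLAIM (what is proved, stated in full; the proofs are below) =====
def Claim_equal_greatestPowerOfTwoLessThan : Prop := ∀ (n : Int), Dom_greatestPowerOfTwoLessThan n → Pre_greatestPowerOfTwoLessThan n → Spec_greatestPowerOfTwoLessThan n (greatestPowerOfTwoLessThan n)

-- ===== LEMMAS AND PROOFS =====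

-- Loop invariant: if 2^k * next < n ≤ 2^(k+1) * next (next > 0) the loop returns 2^k * next.
theorem loop_run (k : Nat) : ∀ (res next n : Int), 0 < next →
    (2 : Int) ^ k * next < n → n ≤ (2 : Int) ^ (k + 1) * next →
    greatestPowerOfTwoLessThanLoop res next n = (2 : Int) ^ k * next := by
  induction k with
  | zero =>
    intro res next n hpos hlt hle
    simp only [pow_zero, one_mul] at hlt ⊢
    have h2 : (2 : Int) ^ (0 + 1) * next = next * 2 := by ring
    rw [greatestPowerOfTwoLessThanLoop, dif_pos ⟨hpos, hlt⟩,
        greatestPowerOfTwoLessThanLoop, dif_neg (by rintro ⟨_, h⟩; omega)]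
  | succ k ih =>
    intro res next n hpos hlt hle
    have h2 : (2 : Int) ^ (k + 1) * next = (2 : Int) ^ k * (next * 2) := by ring
    have h3 : (2 : Int) ^ (k + 1 + 1) * next = (2 : Int) ^ (k + 1) * (next * 2) := by ring
    have hnextlt : next < n := by
      have hp : (1:Int) ≤ (2:Int) ^ (k+1) := one_le_pow₀ (by norm_num)
      nlinarith
    rw [greatestPowerOfTwoLessThanLoop, dif_pos ⟨hpos, hnextlt⟩,
        ih next (next * 2) n (by omega) (by omega) (by omega)]
    ring

-- For m ≥ 1 and k = m.size - 1 : 2^k ≤ m < 2^(k+1).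
theorem size_bounds (m : Nat) (hm : 1 ≤ m) :
    2 ^ (Nat.size m - 1) ≤ m ∧ m < 2 ^ (Nat.size m - 1 + 1) := by
  have hpos : 0 < Nat.size m := Nat.size_pos.mpr hm
  constructor
  · by_contra h
    push Not at h
    have := Nat.size_le.mpr h
    omega
  · have h1 : Nat.size m - 1 + 1 = Nat.size m := by omega
    rw [h1]
    exact Nat.lt_size_self m

-- ===== VERDICT (by name: the statement is the Claim_ definition above) =====
theorem greatestPowerOfTwoLessThan_spec : Claim_equal_greatestPowerOfTwoLessThan := by
  intro n _ hpre
  unfold Pre_greatestPowerOfTwoLessThan at hpre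
  unfold Spec_greatestPowerOfTwoLessThan greatestPowerOfTwoLessThan greatestPowerOfTwoLessThan_alt
  set m : Nat := (n - 1).toNat with hm
  have hm1 : 1 ≤ m := by omega
  have hmn : (m : Int) = n - 1 := by omega
  obtain ⟨hlo, hhi⟩ := size_bounds m hm1
  set k : Nat := Nat.size m - 1 with hk
  have hloZ : (2 : Int) ^ k ≤ (m : Int) := by exact_mod_cast Nat.cast_le.mpr hlo
  have hhiZ : (m : Int) < (2 : Int) ^ (k + 1) := by exact_mod_cast Nat.cast_lt.mpr hhi
  have := loop_run k 0 1 n (by norm_num) (by omega) (by omega)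
  rw [mul_one] at this
  rw [this]
  ring
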